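-- pv_equiv track=rewrite | github.com/wangzl-eric/Invest_strategy | backend/flex_parser.py | _identify_sections
-- ===== SOURCE A (Python) =====
-- from typing import Optional, Dict, List, Any, Tuple
--
-- def _identify_sections(lines: List[str]) -> Dict[str, Tuple[int, int]]:
--     """Identify different sections in the CSV by their header patterns."""
--     sections = {}
--     current_section = None
--     section_start = 0
--
--     for i, line in enumerate(lines):
--         # Account summary section
--         if 'StartingValue' in line and 'EndingValue' in line:
--             if current_section:
--                 sections[current_section] = (section_start, i)
--             current_section = 'account_summary'
--             section_start = i
--
--         # Position MTM section (has CloseQuantity, ClosePrice, TransactionMtmPnl)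
--         elif 'CloseQuantity' in line and 'TransactionMtmPnl' in line:
--             if current_section:
--                 sections[current_section] = (section_start, i)
--             current_section = 'position_mtm'
--             section_start = i
--
--         # Trades section (has TradeID, Buy/Sell, TradePrice)
--         elif 'TradeID' in line and 'Buy/Sell' in line and 'TradePrice' in line:
--             if current_section:
--                 sections[current_section] = (section_start, i)
--             current_section = 'trades'
--             section_start = i
--
--         # Asset summary (has Prior Period Value, Transactions)
--         elif 'Prior Period Value' in line and 'Transactions' in line:
--             if current_section:
--                 sections[current_section] = (section_start, i)
--             current_section = 'asset_summary'
--             section_start = i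
--
--     # Close last section
--     if current_section:
--         sections[current_section] = (section_start, len(lines))
--
--     return sections
-- ===== SOURCE B (Python) =====
-- from typing import Optional, Dict, List, Tuple
--
--
-- def _classify(line: str) -> Optional[str]:
--     if 'StartingValue' in line and 'EndingValue' in line:
--         return 'account_summary'
--     if 'CloseQuantity' in line and 'TransactionMtmPnl' in line:
--         return 'position_mtm'
--     if 'TradeID' in line and 'Buy/Sell' in line and 'TradePrice' in line:
--         return 'trades'
--     if 'Prior Period Value' in line and 'Transactions' in line:
--         return 'asset_summary'
--     return None
--
--
-- def _identify_sections(lines: List[str]) -> Dict[str, Tuple[int, int]]: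
--     """Identify different sections in the CSV by their header patterns."""
--     headers = []
--     for i, line in enumerate(lines):
--         name = _classify(line)
--         if name is not None:
--             headers.append((i, name))
--     ends = [i for i, _ in headers[1:]] + [len(lines)]
--     sections = {}
--     for (i, name), end in zip(headers, ends):
--         sections[name] = (i, end)
--     return sections
-- ===== Notes on version B (the rewrite author's own statement) =====
-- stated objective: simpler
-- what changed: Replaces A's single stateful scan (current-section/section-start bookkeeping with close-on-open and close-at-end) by two stateless passes: collect all header lines with a priority classifier, then zip each header with the next header's index (or len(lines)) to assign section ranges.
import Mathlib
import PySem

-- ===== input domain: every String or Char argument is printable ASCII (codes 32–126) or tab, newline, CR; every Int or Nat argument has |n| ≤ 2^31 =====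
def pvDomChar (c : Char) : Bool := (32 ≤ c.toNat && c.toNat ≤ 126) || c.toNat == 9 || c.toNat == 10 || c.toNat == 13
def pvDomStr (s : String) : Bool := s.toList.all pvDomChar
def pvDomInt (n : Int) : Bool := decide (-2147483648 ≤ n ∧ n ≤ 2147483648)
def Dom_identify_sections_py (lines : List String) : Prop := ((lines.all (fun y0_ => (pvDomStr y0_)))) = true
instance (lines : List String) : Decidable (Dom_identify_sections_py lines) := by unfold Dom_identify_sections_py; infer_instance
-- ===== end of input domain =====

-- B replaces A's stateful single scan by two stateless passes (collect headers, then pair each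
-- with the next header's index); objective: simpler decomposition, same result.

-- ===== PORT A =====
-- loop body of A: on each (i, line) the four elif branches, closing the open section when a new
-- header is found; state = (sections dict, current_section, section_start)
def pvStepA (st : PySem.Dict String (Int × Int) × Option String × Int) (p : Int × String) :
    PySem.Dict String (Int × Int) × Option String × Int :=
  if PySem.Str.isIn "StartingValue" p.2 && PySem.Str.isIn "EndingValue" p.2 then
    ((match st.2.1 with
      | some c => st.1.insert c (st.2.2, p.1)
      | none => st.1), some "account_summary", p.1)
  else if PySem.Str.isIn "CloseQuantity" p.2 && PySem.Str.isIn "TransactionMtmPnl" p.2 then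
    ((match st.2.1 with
      | some c => st.1.insert c (st.2.2, p.1)
      | none => st.1), some "position_mtm", p.1)
  else if PySem.Str.isIn "TradeID" p.2 && PySem.Str.isIn "Buy/Sell" p.2 && PySem.Str.isIn "TradePrice" p.2 then
    ((match st.2.1 with
      | some c => st.1.insert c (st.2.2, p.1)
      | none => st.1), some "trades", p.1)
  else if PySem.Str.isIn "Prior Period Value" p.2 && PySem.Str.isIn "Transactions" p.2 then
    ((match st.2.1 with
      | some c => st.1.insert c (st.2.2, p.1)
      | none => st.1), some "asset_summary", p.1)
  else st

def identify_sections_py (lines : List String) : List (String × Int × Int) :=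
  let st := (PySem.List.enumerate lines).foldl pvStepA (PySem.Dict.empty, none, 0)
  -- "# Close last section": if current_section: sections[current_section] = (section_start, len(lines))
  (match st.2.1 with
   | some c => st.1.insert c (st.2.2, (lines.length : Int))
   | none => st.1).items

-- ===== PORT B =====
-- _classify from Source B: priority classification of one line
def pvClassify (line : String) : Option String :=
  if PySem.Str.isIn "StartingValue" line && PySem.Str.isIn "EndingValue" line then
    some "account_summary"
  else if PySem.Str.isIn "CloseQuantity" line && PySem.Str.isIn "TransactionMtmPnl" line then
    some "position_mtm"
  else if PySem.Str.isIn "TradeID" line && PySem.Str.isIn "Buy/Sell" line && PySem.Str.isIn "TradePrice" line then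
    some "trades"
  else if PySem.Str.isIn "Prior Period Value" line && PySem.Str.isIn "Transactions" line then
    some "asset_summary"
  else none

def identify_sections_py_alt (lines : List String) : List (String × Int × Int) :=
  -- first pass: headers = [(i, name)] for classified lines (append loop)
  let headers := (PySem.List.enumerate lines).foldl
    (fun hs p => match pvClassify p.2 with
      | some n => hs ++ [(p.1, n)]
      | none => hs) []
  -- ends = [i for i, _ in headers[1:]] + [len(lines)]
  let ends := (headers.drop 1).map (·.1) ++ [(lines.length : Int)]
  -- second pass: for (i, name), end in zip(headers, ends): sections[name] = (i, end)
  let sections := (headers.zip ends).foldl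
    (fun d q => d.insert q.1.2 (q.1.1, q.2)) PySem.Dict.empty
  sections.items

-- ===== PRECONDITION & SPEC =====
def Spec_identify_sections_py (lines : List String) (out : List (String × Int × Int)) : Prop := out = identify_sections_py_alt lines
instance (lines : List String) (out : List (String × Int × Int)) : Decidable (Spec_identify_sections_py lines out) := by unfold Spec_identify_sections_py; infer_instance

-- ===== CLAIM (what is proved, stated in full; the proofs are below) =====
def Claim_equal_identify_sections_py : Prop := ∀ (lines : List String), Dom_identify_sections_py lines → Spec_identify_sections_py lines (identify_sections_py lines)

-- ===== LEMMAS AND PROOFS =====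

-- proof-only helpers
def pvHdr (p : Int × String) : Option (Int × String) := (pvClassify p.2).map (fun n => (p.1, n))

def pvStepH (st : PySem.Dict String (Int × Int) × Option String × Int) (h : Int × String) :
    PySem.Dict String (Int × Int) × Option String × Int :=
  ((match st.2.1 with
    | some c => st.1.insert c (st.2.2, h.1)
    | none => st.1), some h.2, h.1)

def pvClose (st : PySem.Dict String (Int × Int) × Option String × Int) (len : Int) :
    PySem.Dict String (Int × Int) :=
  match st.2.1 with
  | some c => st.1.insert c (st.2.2, len)
  | none => st.1

def pvFirstIdx (hs : List (Int × String)) (len : Int) : Int :=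
  match hs with
  | [] => len
  | (i, _) :: _ => i

def pvGDict (d : PySem.Dict String (Int × Int)) (hs : List (Int × String)) (len : Int) :
    PySem.Dict String (Int × Int) :=
  (hs.zip ((hs.drop 1).map (·.1) ++ [len])).foldl (fun d q => d.insert q.1.2 (q.1.1, q.2)) d

theorem pvStepA_eq_classify (st : PySem.Dict String (Int × Int) × Option String × Int)
    (p : Int × String) :
    pvStepA st p = match pvHdr p with
      | some h => pvStepH st h
      | none => st := by
  unfold pvStepA pvHdr pvClassify pvStepH
  split_ifs <;> rfl

theorem pvFoldA_eq_foldH (L : List (Int × String))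
    (st : PySem.Dict String (Int × Int) × Option String × Int) :
    L.foldl pvStepA st = (L.filterMap pvHdr).foldl pvStepH st := by
  induction L generalizing st with
  | nil => rfl
  | cons p L ih =>
      simp only [List.foldl_cons, List.filterMap_cons, pvStepA_eq_classify]
      cases h : pvHdr p with
      | none => simp [ih]
      | some hd => simp [ih]

theorem pvHeaders_fold_eq_filterMap (L : List (Int × String)) (hs0 : List (Int × String)) :
    L.foldl (fun hs p => match pvClassify p.2 with
      | some n => hs ++ [(p.1, n)]
      | none => hs) hs0 = hs0 ++ L.filterMap pvHdr := by
  induction L generalizing hs0 with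
  | nil => simp
  | cons p L ih =>
      simp only [List.foldl_cons, List.filterMap_cons, pvHdr]
      cases h : pvClassify p.2 with
      | none => simp [pvHdr, ih]
      | some n => simp [pvHdr, ih]

theorem pvGDict_cons (d : PySem.Dict String (Int × Int)) (i : Int) (n : String)
    (rest : List (Int × String)) (len : Int) :
    pvGDict d ((i, n) :: rest) len = pvGDict (d.insert n (i, pvFirstIdx rest len)) rest len := by
  cases rest with
  | nil => rfl
  | cons q r2 => rfl

theorem pvMain (hs : List (Int × String)) (d : PySem.Dict String (Int × Int))
    (c : String) (s len : Int) :
    pvClose (hs.foldl pvStepH (d, some c, s)) len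
      = pvGDict (d.insert c (s, pvFirstIdx hs len)) hs len := by
  induction hs generalizing d c s with
  | nil => rfl
  | cons h rest ih =>
      obtain ⟨i, n⟩ := h
      simp only [List.foldl_cons, pvStepH]
      rw [ih, pvGDict_cons]
      rfl

-- ===== VERDICT (by name: the statement is the Claim_ definition above) =====
theorem identify_sections_py_spec : Claim_equal_identify_sections_py := by
  intro lines _
  unfold Spec_identify_sections_py identify_sections_py identify_sections_py_alt
  rw [pvHeaders_fold_eq_filterMap, pvFoldA_eq_foldH]
  simp only [List.nil_append]
  show (pvClose (((PySem.List.enumerate lines 0).filterMap pvHdr).foldl pvStepH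
      (PySem.Dict.empty, none, 0)) (lines.length : Int)).items
    = (pvGDict PySem.Dict.empty ((PySem.List.enumerate lines 0).filterMap pvHdr)
        (lines.length : Int)).items
  cases h : (PySem.List.enumerate lines 0).filterMap pvHdr with
  | nil => rfl
  | cons hd rest =>
      obtain ⟨i, n⟩ := hd
      simp only [List.foldl_cons, pvStepH]
      rw [pvMain, pvGDict_cons]
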